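-- pv_equiv track=rewrite | github.com/Kevinrobot34/atcoder | others/keyence2019/b.py | check
-- ===== SOURCE A (Python) =====
-- def check(s):
--     t = 'keyence'
--     if s == t:
--         return 'YES'
--     for i in range(len(s)):
--         for j in range(i + 1, len(s)):
--             if t == s[:i] + s[j:]:
--                 return 'YES'
--     return 'NO'
-- ===== SOURCE B (Python) =====
-- def check(s):
--     t = 'keyence'
--     if len(s) < len(t):
--         return 'NO'
--     for k in range(len(t) + 1):
--         if s.startswith(t[:k]) and s.endswith(t[k:]):
--             return 'YES'
--     return 'NO'
-- ===== Notes on version B (the rewrite author's own statement) =====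
-- stated objective: faster
-- what changed: Replaced the O(n^2) double loop that rebuilds and compares every s[:i]+s[j:] with a single pass over the 8 prefix/suffix splits of 'keyence' checked via startswith/endswith.
-- intended difference: On strings that start with 'keyence', are longer than 7 and do not end in 'e', A returns 'NO' (its inner loop stops at j=len(s)-1, so a removed substring can never include the last character) while B returns 'YES', which is intended since deleting the suffix after 'keyence' yields 'keyence'. — e.g. on check("keyencea"): A returns "NO", B returns "YES"
import Mathlib
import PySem

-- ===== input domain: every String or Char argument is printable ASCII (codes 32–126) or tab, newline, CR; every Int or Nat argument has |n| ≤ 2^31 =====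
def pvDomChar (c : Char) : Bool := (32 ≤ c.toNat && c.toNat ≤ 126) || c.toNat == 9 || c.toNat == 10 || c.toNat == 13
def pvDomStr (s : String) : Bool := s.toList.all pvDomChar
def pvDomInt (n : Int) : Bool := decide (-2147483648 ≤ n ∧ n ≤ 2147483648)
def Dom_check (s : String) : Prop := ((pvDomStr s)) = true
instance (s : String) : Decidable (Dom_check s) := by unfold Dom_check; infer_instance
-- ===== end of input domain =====

-- B replaces A's double loop over all removable substrings s[i:j] by a single scan of the
-- 8 prefix/suffix splits of 'keyence' via startswith/endswith (objective: faster).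

-- ===== PORT A =====
-- inner loop: for j in range(i + 1, len(s)): if t == s[:i] + s[j:]: return 'YES'
def checkInner (l t : List Char) (i : Int) : Bool :=
  (PySem.List.pyRange (i + 1) (l.length : Int) 1).any fun j =>
    t == PySem.List.slice l none (some i) ++ PySem.List.slice l (some j) none

-- outer loop: for i in range(len(s)): …  ('any' = loop with early 'return YES')
def checkOuter (l t : List Char) : Bool :=
  (PySem.List.pyRange 0 (l.length : Int) 1).any fun i => checkInner l t i

def check (s : String) : String :=
  let t := "keyence"
  if s = t then "YES"
  else if checkOuter s.toList t.toList then "YES" else "NO"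

-- ===== PORT B =====
-- one split test: s.startswith(t[:k]) and s.endswith(t[k:])
def splitOK (l t : List Char) (k : Int) : Bool :=
  PySem.Chars.startswith l (PySem.List.slice t none (some k)) &&
  PySem.Chars.endswith l (PySem.List.slice t (some k) none)

def check_alt (s : String) : String :=
  let t := "keyence"
  if s.toList.length < t.toList.length then "NO"
  else if (PySem.List.pyRange 0 ((t.toList.length : Int) + 1) 1).any
            (fun k => splitOK s.toList t.toList k)
       then "YES" else "NO"

-- ===== PRECONDITION & SPEC =====
-- On strings that start with 'keyence', are longer than 7 and do not end in 'e', A returns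
-- 'NO' (its inner loop stops at j = len(s)-1, so the removed substring can never include the
-- last character) while B returns 'YES', the intended answer (deleting the trailing suffix
-- leaves 'keyence').
def D_check (s : String) : Prop :=
  PySem.Chars.startswith s.toList "keyence".toList = true ∧
  7 < s.toList.length ∧ s.toList.getLast? ≠ some 'e'
instance (s : String) : Decidable (D_check s) := by unfold D_check; infer_instance

def Spec_check (s : String) (out : String) : Prop := ¬ D_check s → out = check_alt s
instance (s : String) (out : String) : Decidable (Spec_check s out) := by unfold Spec_check; infer_instance

def pvDiffWitness_check : String := "keyencea"
def pvDiffWitnessOut_check : String × String := ("NO", "YES")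

-- ===== CLAIM (what is proved, stated in full; the proofs are below) =====
def Claim_unchanged_check : Prop := ∀ (s : String), Dom_check s → Spec_check s (check s)
def Claim_changed_check : Prop := Dom_check (pvDiffWitness_check) ∧ D_check (pvDiffWitness_check) ∧ check (pvDiffWitness_check) = pvDiffWitnessOut_check.1 ∧ check_alt (pvDiffWitness_check) = pvDiffWitnessOut_check.2 ∧ pvDiffWitnessOut_check.1 ≠ pvDiffWitnessOut_check.2
def Claim_exact_check : Prop := ∀ (s : String), Dom_check s → D_check s → check s ≠ check_alt s

-- ===== LEMMAS AND PROOFS =====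

def kT : List Char := ['k', 'e', 'y', 'e', 'n', 'c', 'e']

-- A's loop condition as a Nat existential: some s[:i] + s[j:] with i < j < len(s) is 'keyence'
def PA (l : List Char) : Prop :=
  ∃ i j : Nat, i < j ∧ j < l.length ∧ kT = l.take i ++ l.drop j

-- B's loop condition as a Nat existential: some split of 'keyence' is prefix + suffix of s
def PB (l : List Char) : Prop :=
  ∃ k : Nat, k ≤ 7 ∧ kT.take k <+: l ∧ kT.drop k <:+ l

-- B's loop, abstracted over the list (definitionally the loop in check_alt)
def bcond (l : List Char) : Bool :=
  (PySem.List.pyRange 0 ((kT.length : Int) + 1) 1).any fun k => splitOK l kT k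

theorem bcond_iff (l : List Char) : bcond l = true ↔ PB l := by
  simp only [bcond, splitOK, List.any_eq_true, PySem.List.mem_pyRange_one,
    Bool.and_eq_true, PySem.Chars.startswith_iff, PySem.Chars.endswith_iff]
  constructor
  · rintro ⟨k, ⟨h0, h8⟩, hs, he⟩
    rw [PySem.List.slice_to kT h0] at hs
    rw [PySem.List.slice_from kT h0] at he
    exact ⟨k.toNat, by simp [kT] at h8 ⊢; omega, hs, he⟩
  · rintro ⟨k, hk, hs, he⟩
    refine ⟨(k : Int), ⟨by omega, by simp [kT]; omega⟩, ?_, ?_⟩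
    · rwa [PySem.List.slice_to_natCast]
    · rwa [PySem.List.slice_from_natCast]

theorem eq_append_of_prefix_suffix {l p q : List Char} (hp : p <+: l) (hq : q <:+ l)
    (hlen : p.length + q.length = l.length) : l = p ++ q := by
  have h1 := List.prefix_iff_eq_take.mp hp
  have h2 := List.suffix_iff_eq_drop.mp hq
  have h3 : l.length - q.length = p.length := by omega
  rw [h3] at h2
  conv_lhs => rw [← List.take_append_drop p.length l]
  rw [← h1, ← h2]

theorem PA_char (l : List Char) :
    PA l ↔ 7 < l.length ∧ ∃ k : Nat, k ≤ 6 ∧ kT.take k <+: l ∧ kT.drop k <:+ l := by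
  constructor
  · rintro ⟨i, j, hij, hjn, heq⟩
    have hi : i < l.length := lt_trans hij hjn
    have hlen := congrArg List.length heq
    simp only [List.length_append, List.length_take, List.length_drop,
      Nat.min_eq_left hi.le] at hlen
    have h7 : kT.length = 7 := rfl
    rw [h7] at hlen
    have hti : (l.take i).length = i := by simp [Nat.min_eq_left hi.le]
    have hpre : kT.take i = l.take i := by
      rw [heq, List.take_append_of_le_length (by omega), List.take_take]
      simp
    have hsuf : kT.drop i = l.drop j := by
      rw [heq, List.drop_left' hti]
    refine ⟨by omega, i, by omega, ?_, ?_⟩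
    · rw [hpre]; exact List.take_prefix i l
    · rw [hsuf]; exact List.drop_suffix j l
  · rintro ⟨hn, k, hk, hpre, hsuf⟩
    have hkl : (kT.take k).length = k := by simp [kT]; omega
    have hdl : (kT.drop k).length = 7 - k := by simp [kT]
    have h1 := List.prefix_iff_eq_take.mp hpre
    have h2 := List.suffix_iff_eq_drop.mp hsuf
    rw [hkl] at h1; rw [hdl] at h2
    refine ⟨k, l.length - (7 - k), by omega, by omega, ?_⟩
    rw [← h1, ← h2, List.take_append_drop]

theorem suffix_getLast? {l q : List Char} (hq : q <:+ l) (hne : q ≠ []) :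
    l.getLast? = q.getLast? := by
  obtain ⟨r, rfl⟩ := hq
  exact List.getLast?_append_of_ne_nil _ hne

theorem outer_iff (l : List Char) : checkOuter l kT = true ↔ PA l := by
  simp only [checkOuter, checkInner, List.any_eq_true, PySem.List.mem_pyRange_one, beq_iff_eq]
  constructor
  · rintro ⟨i, ⟨h0, hi⟩, j, ⟨hij, hj⟩, heq⟩
    refine ⟨i.toNat, j.toNat, by omega, by omega, ?_⟩
    rw [PySem.List.slice_to l h0, PySem.List.slice_from l (by omega)] at heq
    exact heq
  · rintro ⟨i, j, hij, hj, heq⟩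
    refine ⟨(i : Int), ⟨by omega, by omega⟩, (j : Int), ⟨by omega, by omega⟩, ?_⟩
    rw [PySem.List.slice_to_natCast, PySem.List.slice_from_natCast]
    exact heq

theorem outer_false {l : List Char} (h : ¬ PA l) : checkOuter l kT = false := by
  cases hco : checkOuter l kT
  · rfl
  · exact absurd ((outer_iff l).mp hco) h

theorem bcond_false {l : List Char} (h : ¬ PB l) : bcond l = false := by
  cases hb : bcond l
  · rfl
  · exact absurd ((bcond_iff l).mp hb) h

theorem core (l : List Char) (hne : l ≠ kT)
    (hD' : ¬(kT <+: l ∧ 7 < l.length ∧ l.getLast? ≠ some 'e')) :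
    (if checkOuter l kT then "YES" else "NO")
      = (if l.length < 7 then "NO" else if bcond l then "YES" else "NO") := by
  by_cases h7 : l.length < 7
  · rw [if_pos h7, outer_false (fun h => by have := ((PA_char l).mp h).1; omega)]
    rfl
  · rw [if_neg h7]
    by_cases heq7 : l.length = 7
    · have hPA : ¬ PA l := fun h => by have := ((PA_char l).mp h).1; omega
      have hPB : ¬ PB l := by
        rintro ⟨k, hk, hpre, hsuf⟩
        apply hne
        have hl : l = kT.take k ++ kT.drop k :=
          eq_append_of_prefix_suffix hpre hsuf
            (by simp only [List.length_take, List.length_drop]; simp [kT]; omega)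
        rw [List.take_append_drop] at hl
        exact hl
      rw [outer_false hPA, bcond_false hPB]
    · have h7' : 7 < l.length := by omega
      have hiff : PA l ↔ PB l := by
        rw [PA_char]
        constructor
        · rintro ⟨_, k, hk, hp, hq⟩; exact ⟨k, by omega, hp, hq⟩
        · rintro ⟨k, hk7, hp, hq⟩
          refine ⟨h7', ?_⟩
          by_cases hk6 : k ≤ 6
          · exact ⟨k, hk6, hp, hq⟩
          · have : k = 7 := by omega
            subst this
            have hpre : kT <+: l := by
              have : kT.take 7 = kT := rfl
              rwa [this] at hp
            have hlast : l.getLast? = some 'e' := by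
              by_contra hne'
              exact hD' ⟨hpre, h7', hne'⟩
            refine ⟨6, le_refl 6, (List.take_prefix 6 kT).trans hpre, ?_⟩
            have hd6 : kT.drop 6 = ['e'] := rfl
            rw [hd6]
            have hnil : l ≠ [] := by intro h; rw [h] at h7'; simp at h7'
            have hgl : l.getLast hnil = 'e' := by
              have := List.getLast?_eq_some_getLast hnil
              rw [hlast] at this
              exact (Option.some_injective _ this.symm)
            exact ⟨l.dropLast, by rw [← hgl]; exact List.dropLast_append_getLast hnil⟩
      by_cases hpa : PA l
      · rw [(outer_iff l).mpr hpa, (bcond_iff l).mpr (hiff.mp hpa)]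
      · rw [outer_false hpa, bcond_false (fun h => hpa (hiff.mpr h))]

theorem main_equiv (s : String) (hD : ¬ D_check s) : check s = check_alt s := by
  by_cases hs : s = "keyence"
  · subst hs; rfl
  · have hne : s.toList ≠ kT := by
      intro h
      exact hs (String.toList_injective h)
    have hD' : ¬(kT <+: s.toList ∧ 7 < s.toList.length ∧ s.toList.getLast? ≠ some 'e') := by
      rintro ⟨h1, h2, h3⟩
      exact hD ⟨(PySem.Chars.startswith_iff _ _).mpr h1, h2, h3⟩
    have goal :
        (if s = "keyence" then "YES" else if checkOuter s.toList kT then "YES" else "NO")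
          = (if s.toList.length < 7 then "NO" else if bcond s.toList then "YES" else "NO") := by
      rw [if_neg hs]
      exact core s.toList hne hD'
    exact goal

theorem drop_last_e (k : Nat) (hk : k ≤ 6) : (kT.drop k).getLast? = some 'e' := by
  interval_cases k <;> rfl

theorem tight (s : String) (hD : D_check s) : check s ≠ check_alt s := by
  obtain ⟨h1, h2, h3⟩ := hD
  have hpre : kT <+: s.toList := (PySem.Chars.startswith_iff _ _).mp h1
  have hs : s ≠ "keyence" := by
    intro h; subst h; simp at h2
  have hA : check s = "NO" := by
    have hPA : ¬ PA s.toList := by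
      intro h
      obtain ⟨_, k, hk, _, hq⟩ := (PA_char _).mp h
      have hnn : kT.drop k ≠ [] := by
        intro h'
        have := congrArg List.length h'
        simp [kT] at this
        omega
      have := suffix_getLast? hq hnn
      rw [drop_last_e k hk] at this
      exact h3 this
    show (if s = "keyence" then "YES" else if checkOuter s.toList kT then "YES" else "NO") = "NO"
    rw [if_neg hs, outer_false hPA]
    rfl
  have hB : check_alt s = "YES" := by
    have hPB : PB s.toList := by
      refine ⟨7, le_refl 7, ?_, ?_⟩
      · have : kT.take 7 = kT := rfl
        rw [this]; exact hpre
      · have : kT.drop 7 = [] := rfl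
        rw [this]; exact List.nil_suffix
    show (if s.toList.length < 7 then "NO" else if bcond s.toList then "YES" else "NO") = "YES"
    rw [if_neg (by omega), (bcond_iff _).mpr hPB]
    rfl
  rw [hA, hB]
  decide

-- ===== VERDICT (by name: the statement is the Claim_ definition above) =====
theorem check_spec : Claim_unchanged_check := by
  intro s _ hD
  exact main_equiv s hD

theorem check_changed : Claim_changed_check := by
  unfold Claim_changed_check; decide

theorem check_tight : Claim_exact_check := by
  intro s _ hD
  exact tight s hD
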